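-- pv_equiv track=rewrite | github.com/DmitryKuptsov/computing-for-ds-hw2 | hw2_third_questions.py | country_with_most_cases
-- ===== SOURCE A (Python) =====
-- def total_registered_cases(data, country):
--     if data.get(country) is None:
--         return 0
--     arr_cases = data[country]
--     return sum(arr_cases)
--
-- def total_registered_cases_per_country(data):
--     dict_total_cases = {}
--     for country in data.keys():
--         total = total_registered_cases(data, country)
--         dict_total_cases[country] = total
--     return dict_total_cases
--
-- def country_with_most_cases(data):
--     dict_total_cases = total_registered_cases_per_country(data)
--     max_cnt = 0
--     for country, cnt in dict_total_cases.items():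
--         if cnt > max_cnt:
--             max_cnt = cnt
--             max_country = country
--     return max_country
-- ===== SOURCE B (Python) =====
-- def country_with_most_cases(data):
--     max_cnt = 0
--     max_country = None
--     for country, value in data.items():
--         total = 0 if value is None else sum(value)
--         if total > max_cnt:
--             max_cnt = total
--             max_country = country
--     return max_country
-- ===== Notes on version B (the rewrite author's own statement) =====
-- stated objective: simpler
-- what changed: B makes a single pass over data.items(), tracking the running maximum total directly, instead of A's helper-per-key lookup pass that builds an intermediate totals dict and a second pass over it; Pre_ excludes inputs with no strictly positive total (A raises NameError there) and association lists with duplicate keys, an artifact of the dict encoding with no Python-dict counterpart.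
import Mathlib
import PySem

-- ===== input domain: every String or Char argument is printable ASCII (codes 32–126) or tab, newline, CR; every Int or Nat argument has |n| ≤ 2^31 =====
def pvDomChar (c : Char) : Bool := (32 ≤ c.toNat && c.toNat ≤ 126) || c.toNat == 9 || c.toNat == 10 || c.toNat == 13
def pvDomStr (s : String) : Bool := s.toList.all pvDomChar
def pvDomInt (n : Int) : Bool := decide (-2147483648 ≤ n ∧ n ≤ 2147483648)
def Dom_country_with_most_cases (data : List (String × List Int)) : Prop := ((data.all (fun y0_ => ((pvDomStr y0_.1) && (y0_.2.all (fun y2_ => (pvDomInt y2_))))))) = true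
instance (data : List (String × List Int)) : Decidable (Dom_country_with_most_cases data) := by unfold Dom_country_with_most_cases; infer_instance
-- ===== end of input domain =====

-- B replaces A's helper + intermediate totals dict + second pass by one pass keeping the running maximum (objective: simpler).


-- ===== PORT A =====
-- total_registered_cases(data, country)
def pvTotalRegistered (d : PySem.Dict String (List Int)) (c : String) : Int :=
  match d.get? c with
  | none => 0
  | some arr => arr.sum

-- total_registered_cases_per_country(data)
def pvTotalsPerCountry (d : PySem.Dict String (List Int)) : PySem.Dict String Int :=
  d.keys.foldl (fun acc c => acc.insert c (pvTotalRegistered d c)) PySem.Dict.empty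

-- the final loop: max_country is unbound (NameError) when no total exceeds 0; Pre_ excludes that,
-- so the state carries Option String and the final .getD "" is unreached under Pre_.
def country_with_most_cases (data : List (String × List Int)) : String :=
  let d : PySem.Dict String (List Int) := PySem.Dict.mk data
  let st := (pvTotalsPerCountry d).items.foldl
    (fun (st : Int × Option String) p => if st.1 < p.2 then (p.2, some p.1) else st) (0, none)
  st.2.getD ""

-- ===== PORT B =====
-- single pass over data.items(); the values are always lists here, so 'value is None' is never true and
-- total = sum(value); max_country is None when no total exceeds 0 (Pre_ excludes that; .getD "" unreached).
def country_with_most_cases_alt (data : List (String × List Int)) : String :=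
  (data.foldl
    (fun (st : Int × Option String) p => if st.1 < p.2.sum then (p.2.sum, some p.1) else st)
    (0, none)).2.getD ""

-- ===== PRECONDITION & SPEC =====
-- Pre_ excludes (a) inputs with no strictly positive total, where A raises NameError (max_country unbound),
-- and (b) association lists with duplicate keys, an artifact of the dict-as-list encoding that no Python
-- dict argument can exhibit.
def Pre_country_with_most_cases (data : List (String × List Int)) : Prop :=
  (data.map Prod.fst).Nodup ∧ ∃ p ∈ data, 0 < p.2.sum
instance (data : List (String × List Int)) : Decidable (Pre_country_with_most_cases data) := by unfold Pre_country_with_most_cases; infer_instance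

def pvWitness_country_with_most_cases : (List (String × List Int)) := [("a", [1])]

def Spec_country_with_most_cases (data : List (String × List Int)) (out : String) : Prop := out = country_with_most_cases_alt data
instance (data : List (String × List Int)) (out : String) : Decidable (Spec_country_with_most_cases data out) := by unfold Spec_country_with_most_cases; infer_instance

-- ===== CLAIM (what is proved, stated in full; the proofs are below) =====
def Claim_equal_country_with_most_cases : Prop := ∀ (data : List (String × List Int)), Dom_country_with_most_cases data → Pre_country_with_most_cases data → Spec_country_with_most_cases data (country_with_most_cases data)

-- ===== LEMMAS AND PROOFS =====

-- inserting a run of fresh, pairwise-distinct keys appends their items in order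
theorem items_foldl_insert (f : String → Int) :
    ∀ (cs : List String) (acc : PySem.Dict String Int), cs.Nodup →
    (∀ c ∈ cs, acc.contains c = false) →
    (cs.foldl (fun a c => a.insert c (f c)) acc).items = acc.items ++ cs.map (fun c => (c, f c)) := by
  intro cs
  induction cs with
  | nil => intro acc _ _; simp
  | cons c cs ih =>
    intro acc hnd hfresh
    simp only [List.foldl_cons, List.map_cons]
    rw [ih (acc.insert c (f c)) (List.Nodup.of_cons hnd)]
    · rw [PySem.Dict.items_insert_of_not_contains acc (f c) (hfresh c (by simp))]
      simp
    · intro c' hc'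
      rw [PySem.Dict.contains_insert]
      have hne : c' ≠ c := by
        rcases List.nodup_cons.mp hnd with ⟨hnotin, _⟩
        intro h; exact hnotin (h ▸ hc')
      simp [hne, hfresh c' (List.mem_cons_of_mem _ hc')]

theorem totals_items (data : List (String × List Int)) (hnd : (data.map Prod.fst).Nodup) :
    (pvTotalsPerCountry (PySem.Dict.mk data)).items
      = data.map (fun p => (p.1, p.2.sum)) := by
  unfold pvTotalsPerCountry
  rw [items_foldl_insert _ (PySem.Dict.mk data).keys PySem.Dict.empty
        (by simpa [PySem.Dict.keys_mk] using hnd)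
        (by intro c _; exact PySem.Dict.contains_empty c)]
  have hkeys : (PySem.Dict.mk data).keys = data.map Prod.fst := PySem.Dict.keys_mk data
  rw [hkeys]
  simp only [PySem.Dict.empty, List.nil_append, List.map_map]
  refine List.map_congr_left ?_
  intro p hp
  have hget : (PySem.Dict.mk data).get? p.1 = some p.2 :=
    PySem.Dict.get?_of_mem_items (PySem.Dict.mk data) (by simpa using hp)
      (by simpa [PySem.Dict.keys_mk] using hnd)
  simp [Function.comp, pvTotalRegistered, hget]

-- ===== VERDICT (by name: the statement is the Claim_ definition above) =====
theorem country_with_most_cases_spec : Claim_equal_country_with_most_cases := by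
  intro data _ hpre
  unfold Spec_country_with_most_cases country_with_most_cases country_with_most_cases_alt
  simp only []
  rw [totals_items data hpre.1, List.foldl_map]
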